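-- pv_equiv track=rewrite | github.com/NahinM/CSE331 | Checkers/python/package/CheckerFuns/checkerFun_kkp_Fall25.py | question19
-- ===== SOURCE A (Python) =====
-- def question19(L:str) -> bool:
--     i=0
--     while i<len(L) and L[i]!='1': i+=1
--     zero = 0
--     while i<len(L):
--         if L[i] == '0': zero+=1
--         else:
--             if zero&1: return False
--             zero = 0
--         i+=1
--     return True
-- ===== SOURCE B (Python) =====
-- def question19(L: str) -> bool:
--     i = L.find('1')
--     if i == -1:
--         return True
--     parts = ''.join('0' if c == '0' else 'X' for c in L[i:]).split('X')
--     return all(len(p) % 2 == 0 for p in parts[:-1])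
-- ===== Notes on version B (the rewrite author's own statement) =====
-- stated objective: simpler
-- what changed: Replaces the two manual index-while loops with a zero-counter by normalize-and-split: find the first one-digit, map every other non-zero character of the suffix to a separator, split on it and check that every run of zeros except the trailing one has even length.
import Mathlib
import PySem

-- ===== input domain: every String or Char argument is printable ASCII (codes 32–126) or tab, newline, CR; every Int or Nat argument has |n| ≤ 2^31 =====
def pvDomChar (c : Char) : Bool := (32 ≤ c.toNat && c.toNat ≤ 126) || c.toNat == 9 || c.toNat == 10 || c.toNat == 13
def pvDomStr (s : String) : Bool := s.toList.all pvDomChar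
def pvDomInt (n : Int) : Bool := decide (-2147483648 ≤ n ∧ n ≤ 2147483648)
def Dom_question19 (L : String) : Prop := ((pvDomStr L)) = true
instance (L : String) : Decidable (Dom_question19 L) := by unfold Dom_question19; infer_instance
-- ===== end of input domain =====

-- B replaces A's two manual index loops with find-the-first-'1', normalize the suffix, split on the
-- separator mark and check the zero-runs (objective: simpler). Same return value everywhere.

-- ===== PORT A =====
-- first while loop: advance until end of string or a '1'
def question19_skip : List Char → List Char
  | [] => []
  | c :: rest => if c = '1' then c :: rest else question19_skip rest

-- second while loop, carrying the 'zero' counter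
def question19_loop : List Char → Nat → Bool
  | [], _ => true
  | c :: rest, zero =>
      if c = '0' then question19_loop rest (zero + 1)
      else if zero &&& 1 ≠ 0 then false
      else question19_loop rest 0

def question19 (L : String) : Bool :=
  question19_loop (question19_skip L.toList) 0

-- ===== PORT B =====
def question19_alt (L : String) : Bool :=
  let i := PySem.Chars.find L.toList ['1']      -- L.find('1')
  if i = -1 then true
  else
    -- ''.join('0' if c == '0' else 'X' for c in L[i:])
    let norm := (PySem.List.slice L.toList (some i) none).map
                  (fun c => if c = '0' then '0' else 'X')
    let parts := PySem.Chars.splitOn norm ['X']          -- .split('X')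
    (PySem.List.slice parts none (some (-1))).all        -- parts[:-1]
      (fun p => p.length % 2 == 0)                       -- all(len(p) % 2 == 0 …)

-- ===== PRECONDITION & SPEC =====
def Spec_question19 (L : String) (out : Bool) : Prop := out = question19_alt L
instance (L : String) (out : Bool) : Decidable (Spec_question19 L out) := by unfold Spec_question19; infer_instance

-- ===== CLAIM (what is proved, stated in full; the proofs are below) =====
def Claim_equal_question19 : Prop := ∀ (L : String), Dom_question19 L → Spec_question19 L (question19 L)

-- ===== LEMMAS AND PROOFS =====

-- lengths of the maximal zero-runs of cs, in order, as Python's split on every non-'0' yields them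
def pvZRuns : List Char → List Nat
  | [] => [0]
  | c :: r => if c = '0' then (1 + (pvZRuns r).headI) :: (pvZRuns r).tail else 0 :: pvZRuns r

-- the even-runs check both programs compute (all but the trailing run even)
def pvChk (l : List Nat) : Bool := l.dropLast.all (fun n => n % 2 == 0)

-- prepend a chunk onto the first part
def pvConsH (p : List Char) : List (List Char) → List (List Char)
  | [] => [p]
  | q :: t => (p ++ q) :: t

-- structural form of split on the single separator 'X'
def pvMP : List Char → List (List Char)
  | [] => [[]]
  | c :: r => if c = 'X' then [] :: pvMP r else pvConsH [c] (pvMP r)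

lemma pvZRuns_ne_nil (cs : List Char) : pvZRuns cs ≠ [] := by
  cases cs with
  | nil => simp [pvZRuns]
  | cons c r => unfold pvZRuns; split <;> simp

lemma pvMP_ne_nil (cs : List Char) : pvMP cs ≠ [] := by
  cases cs with
  | nil => simp [pvMP]
  | cons c r =>
      unfold pvMP; split
      · simp
      · cases h : pvMP r with
        | nil => simp [pvConsH]
        | cons q t => simp [pvConsH]

lemma pvSkip_len_le (cs : List Char) : (question19_skip cs).length ≤ cs.length := by
  induction cs with
  | nil => simp [question19_skip]
  | cons c r ih => unfold question19_skip; split <;> simp; omega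

lemma pvSkip_eq_drop (cs : List Char) :
    question19_skip cs = cs.drop (cs.length - (question19_skip cs).length) := by
  induction cs with
  | nil => simp [question19_skip]
  | cons c r ih =>
      unfold question19_skip
      split
      · simp
      · have h := pvSkip_len_le r
        have : (c :: r).length - (question19_skip r).length
             = ((r.length - (question19_skip r).length) + 1) := by simp; omega
        rw [this]
        simpa using ih

-- the find.go loop located against A's skip loop
lemma pvFind_go (cs : List Char) (k : Nat) :
    PySem.Chars.find.go ['1'] cs k =
      (if question19_skip cs = [] then (-1 : Int)
       else ((k + cs.length - (question19_skip cs).length : Nat) : Int)) := by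
  induction cs generalizing k with
  | nil => simp [PySem.Chars.find.go, question19_skip]
  | cons c r ih =>
      rw [PySem.Chars.find.go]
      by_cases hc : c = '1'
      · have hp : List.isPrefixOf ['1'] (c :: r) = true := by
          simp [List.isPrefixOf, hc]
        rw [if_pos hp]
        have : question19_skip (c :: r) = c :: r := by simp [question19_skip, hc]
        simp [this]
      · have hp : List.isPrefixOf ['1'] (c :: r) = false := by
          simp [List.isPrefixOf]; exact fun h => absurd h.symm hc
        rw [if_neg (by simp [hp])]
        have hs : question19_skip (c :: r) = question19_skip r := by
          simp [question19_skip, hc]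
        rw [ih, hs]
        have h := pvSkip_len_le r
        split
        · rfl
        · congr 1; simp only [List.length_cons]; omega

lemma pvFind_eq (cs : List Char) :
    PySem.Chars.find cs ['1'] =
      (if question19_skip cs = [] then (-1 : Int)
       else ((cs.length - (question19_skip cs).length : Nat) : Int)) := by
  rw [PySem.Chars.find, pvFind_go]; simp

-- splitOn's fueled worker, characterised structurally
lemma pvGo_eq (l : List Char) (fuel : Nat) (cur : List Char) (acc : List (List Char))
    (hf : l.length ≤ fuel) :
    PySem.Chars.splitOn.go ['X'] fuel l cur acc
      = acc.reverse ++ pvConsH cur.reverse (pvMP l) := by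
  induction l generalizing fuel cur acc with
  | nil =>
      cases fuel <;> simp [PySem.Chars.splitOn.go, pvMP, pvConsH]
  | cons c r ih =>
      cases fuel with
      | zero => simp at hf
      | succ f =>
          rw [PySem.Chars.splitOn.go]
          by_cases hc : c = 'X'
          · have hp : List.isPrefixOf ['X'] (c :: r) = true := by
              simp [List.isPrefixOf, hc]
            rw [if_pos hp]
            have : List.drop (List.length ['X']) (c :: r) = r := by simp
            rw [this, ih f [] (cur.reverse :: acc) (by simpa using Nat.le_of_succ_le_succ hf)]
            have hmp : pvConsH [] (pvMP r) = pvMP r := by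
              cases h : pvMP r with
              | nil => exact absurd h (pvMP_ne_nil r)
              | cons q t => simp [pvConsH]
            have hx : pvMP (c :: r) = [] :: pvMP r := by simp [pvMP, hc]
            rw [hx]
            simp only [List.reverse_nil] at *
            rw [hmp]
            simp [pvConsH]
          · have hp : List.isPrefixOf ['X'] (c :: r) = false := by
              simp [List.isPrefixOf]; exact fun h => absurd h.symm hc
            rw [if_neg (by simp [hp])]
            rw [ih f (c :: cur) acc (by simpa using Nat.le_of_succ_le_succ hf)]
            have : pvMP (c :: r) = pvConsH [c] (pvMP r) := by simp [pvMP, hc]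
            rw [this]
            cases h : pvMP r with
            | nil => exact absurd h (pvMP_ne_nil r)
            | cons q t => simp [pvConsH]

lemma pvSplitOn_eq (cs : List Char) :
    PySem.Chars.splitOn cs ['X'] = pvMP cs := by
  rw [PySem.Chars.splitOn, pvGo_eq cs (cs.length + 1) [] [] (by omega)]
  cases h : pvMP cs with
  | nil => exact absurd h (pvMP_ne_nil cs)
  | cons q t => simp [pvConsH]

-- run lengths of the normalized string are pvZRuns of the original
lemma pvMP_norm (cs : List Char) :
    (pvMP (cs.map (fun c => if c = '0' then '0' else 'X'))).map List.length = pvZRuns cs := by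
  induction cs with
  | nil => simp [pvMP, pvZRuns]
  | cons c r ih =>
      by_cases hc : c = '0'
      · have h0 : (if c = '0' then '0' else 'X') = '0' := by simp [hc]
        simp only [List.map_cons, h0]
        have hx : pvMP ('0' :: r.map (fun c => if c = '0' then '0' else 'X'))
            = pvConsH ['0'] (pvMP (r.map (fun c => if c = '0' then '0' else 'X'))) := by
          simp [pvMP]
        rw [hx]
        cases h : pvMP (r.map (fun c => if c = '0' then '0' else 'X')) with
        | nil => exact absurd h (pvMP_ne_nil _)
        | cons q t =>
            rw [h] at ih
            simp [pvConsH, pvZRuns, hc, ← ih, Nat.add_comm]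
      · have h0 : (if c = '0' then '0' else 'X') = 'X' := by simp [hc]
        simp only [List.map_cons, h0]
        have hx : pvMP ('X' :: r.map (fun c => if c = '0' then '0' else 'X'))
            = [] :: pvMP (r.map (fun c => if c = '0' then '0' else 'X')) := by
          simp [pvMP]
        rw [hx]
        simp [pvZRuns, hc, ← ih]

-- A's counting loop computes the even-runs check
lemma pvLoop_eq (cs : List Char) (zero : Nat) :
    question19_loop cs zero = pvChk ((zero + (pvZRuns cs).headI) :: (pvZRuns cs).tail) := by
  induction cs generalizing zero with
  | nil => simp [question19_loop, pvZRuns, pvChk]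
  | cons c r ih =>
      by_cases hc : c = '0'
      · have hz : pvZRuns (c :: r) = (1 + (pvZRuns r).headI) :: (pvZRuns r).tail := by
          simp [pvZRuns, hc]
        rw [hz]
        have hl : question19_loop (c :: r) zero = question19_loop r (zero + 1) := by
          simp [question19_loop, hc]
        rw [hl, ih]
        simp only [List.headI, List.tail_cons]
        congr 2
        omega
      · have hz : pvZRuns (c :: r) = 0 :: pvZRuns r := by simp [pvZRuns, hc]
        rw [hz]
        cases h : pvZRuns r with
        | nil => exact absurd h (pvZRuns_ne_nil r)
        | cons q t =>
            have hl : question19_loop (c :: r) zero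
                = if zero &&& 1 ≠ 0 then false else question19_loop r 0 := by
              simp [question19_loop, hc]
            rw [hl, ih, h]
            by_cases hodd : zero % 2 = 0
            · simp [Nat.and_one_is_mod, pvChk, hodd]
            · simp [Nat.and_one_is_mod, pvChk, Nat.mod_two_ne_zero.mp hodd]

-- ===== VERDICT (by name: the statement is the Claim_ definition above) =====
theorem question19_spec : Claim_equal_question19 := by
  intro L _
  unfold Spec_question19 question19 question19_alt
  rw [pvFind_eq L.toList]
  by_cases hnil : question19_skip L.toList = []
  · simp only [hnil]
    simp [question19_loop]
  · rw [if_neg hnil]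
    have hne : ((L.toList.length - (question19_skip L.toList).length : Nat) : Int) ≠ -1 := by
      omega
    rw [if_neg hne]
    rw [PySem.List.slice_from_natCast]
    rw [← pvSkip_eq_drop L.toList]
    simp only [pvSplitOn_eq, PySem.List.slice_to_neg_one]
    rw [pvLoop_eq]
    cases h : pvZRuns (question19_skip L.toList) with
    | nil => exact absurd h (pvZRuns_ne_nil _)
    | cons q t =>
        have hmp := pvMP_norm (question19_skip L.toList)
        rw [h] at hmp
        simp only [List.headI, List.tail_cons, Nat.zero_add]
        rw [← hmp]
        unfold pvChk
        rw [← List.map_dropLast, List.all_map]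
        rfl
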